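-- pv_equiv track=rewrite | github.com/gaboza12/we-are-algorithm | 724thomas/Week6 Greedy/21925.py | solution
-- ===== SOURCE A (Python) =====
-- def solution(n, arr):
--     def check():
--         if len(stack) % 2 == 1:
--             return False
--         for i in range(len(stack) // 2):
--             if stack[i] != stack[-1 - i]:
--                 return False
--         return True
--
--     stack = []
--     count = 0
--     for n in arr:
--         stack.append(n)
--         if check():
--             count += 1
--             stack.clear()
--
--     return count if not stack else -1
-- ===== SOURCE B (Python) =====
-- def solution(n, arr):
--     # Greedy by segment: repeatedly cut off the shortest even-length palindromic
--     # prefix of the remaining list; if none exists, the answer is -1.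
--     count = 0
--     rest = arr
--     while rest:
--         for j in range(2, len(rest) + 1, 2):
--             seg = rest[:j]
--             if seg == seg[::-1]:
--                 count += 1
--                 rest = rest[j:]
--                 break
--         else:
--             return -1
--     return count
-- ===== Notes on version B (the rewrite author's own statement) =====
-- stated objective: alternative
-- what changed: B repeatedly cuts off the shortest even-length palindromic prefix of the remaining list (a step-2 search comparing each candidate slice with its reversal), instead of A's per-element stack simulation with a half-index palindrome check after every push.
import Mathlib
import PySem

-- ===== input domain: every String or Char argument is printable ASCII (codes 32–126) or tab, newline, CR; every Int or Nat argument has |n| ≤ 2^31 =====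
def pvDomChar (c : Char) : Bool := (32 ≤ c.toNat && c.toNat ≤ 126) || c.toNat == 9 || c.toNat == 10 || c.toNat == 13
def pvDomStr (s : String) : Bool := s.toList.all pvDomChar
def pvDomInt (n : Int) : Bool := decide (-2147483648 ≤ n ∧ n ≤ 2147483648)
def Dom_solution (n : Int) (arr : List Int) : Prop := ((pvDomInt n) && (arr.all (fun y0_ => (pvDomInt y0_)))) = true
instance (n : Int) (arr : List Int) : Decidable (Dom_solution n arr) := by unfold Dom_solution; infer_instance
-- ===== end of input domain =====

-- B cuts the array into segments directly (shortest even palindromic prefix, found by a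
-- step-2 search comparing a slice with its reversal) instead of simulating A's per-element
-- stack with a half-index check; same return value, including -1 on failure (objective: alternative).

-- ===== PORT A =====
-- A's inner `check()` on the current stack: length parity, then index pairs i / -1-i.
def checkA (stack : List Int) : Bool :=
  if stack.length % 2 == 1 then false
  else
    (List.range (stack.length / 2)).all
      (fun i => PySem.List.pyGet? stack (i : Int) == PySem.List.pyGet? stack (-1 - (i : Int)))

-- one iteration of A's `for n in arr` loop, state = (stack, count)
def stepA (p : List Int × Int) (x : Int) : List Int × Int :=
  let stack := p.1 ++ [x]
  if checkA stack then ([], p.2 + 1) else (stack, p.2)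

def solution (n : Int) (arr : List Int) : Int :=
  let p := arr.foldl stepA ([], 0)
  if p.1.isEmpty then p.2 else -1

-- ===== PORT B =====
-- the `for j in range(2, len(rest)+1, 2): … else:` search, as the obvious index recursion;
-- rest[:j] is PySem.List.slice, seg[::-1] is List.reverse (PySem.List.slice?_none_none_neg_one)
def searchB (rest : List Int) (j : Int) : Option Int :=
  if h : j ≤ (rest.length : Int) then
    let seg := PySem.List.slice rest none (some j)
    if seg == seg.reverse then some j else searchB rest (j + 2)
  else none
termination_by ((rest.length : Int) + 2 - j).toNat
decreasing_by omega

-- the port of goB's recursion needs these bounds on the found j for termination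
theorem searchB_bounds (rest : List Int) (j r : Int)
    (h : searchB rest j = some r) : j ≤ r ∧ r ≤ (rest.length : Int) := by
  revert r h
  induction j using searchB.induct rest with
  | case1 j hle seg hpal =>
      intro r h; rw [searchB] at h
      simp only [dif_pos hle] at h
      rw [if_pos hpal] at h
      simp at h; omega
  | case2 j hle seg hpal ih =>
      intro r h; rw [searchB] at h; simp only [dif_pos hle] at h
      rw [if_neg hpal] at h
      have := ih r h; omega
  | case3 j hle =>
      intro r h; rw [searchB] at h; simp [hle] at h

def goB (rest : List Int) (count : Int) : Int :=
  if rest.isEmpty then count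
  else
    match h : searchB rest 2 with
    | some j => goB (PySem.List.slice rest (some j) none) (count + 1)
    | none => -1
termination_by rest.length
decreasing_by
  have hb := searchB_bounds rest 2 j h
  have hlen : (PySem.List.slice rest (some j) none).length = rest.length - j.toNat := by
    rw [PySem.List.slice_from rest (by omega : (0:Int) ≤ j)]
    simp
  omega

def solution_alt (n : Int) (arr : List Int) : Int := goB arr 0

-- ===== PRECONDITION & SPEC =====
def Spec_solution (n : Int) (arr : List Int) (out : Int) : Prop := out = solution_alt n arr
instance (n : Int) (arr : List Int) (out : Int) : Decidable (Spec_solution n arr out) := by unfold Spec_solution; infer_instance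

-- ===== CLAIM (what is proved, stated in full; the proofs are below) =====
def Claim_equal_solution : Prop := ∀ (n : Int) (arr : List Int), Dom_solution n arr → Spec_solution n arr (solution n arr)

-- ===== LEMMAS AND PROOFS =====

-- A's run from an arbitrary state (stack, count)
def runA (s : List Int) (c : Int) (t : List Int) : Int :=
  let p := t.foldl stepA (s, c)
  if p.1.isEmpty then p.2 else -1

-- index i (counting from 1) of the first extension making the stack an even palindrome
def extSearch (s t : List Int) : Option Nat :=
  match t with
  | [] => none
  | x :: t' => if checkA (s ++ [x]) then some 1 else (extSearch (s ++ [x]) t').map (· + 1)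

theorem checkA_true_iff (s : List Int) :
    checkA s = true ↔ s.length % 2 = 0 ∧ s = s.reverse := by
  by_cases hodd : s.length % 2 = 1
  · simp [checkA, hodd]
  · have heven : s.length % 2 = 0 := by omega
    simp only [checkA, beq_iff_eq, hodd, if_false, List.all_eq_true, List.mem_range]
    constructor
    · intro hall
      refine ⟨heven, List.ext_getElem? fun i => ?_⟩
      by_cases hi : i < s.length
      · rw [List.getElem?_reverse hi]
        rcases lt_or_ge i (s.length / 2) with hlt | hge
        · have := hall i hlt
          rw [PySem.List.pyGet?_natCast] at this
          rw [show (-1 - (i:Int)) = -((i+1 : Nat) : Int) by push_cast; ring] at this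
          rw [PySem.List.pyGet?_neg_natCast s (i+1) (by omega) (by omega)] at this
          simpa [show s.length - (i+1) = s.length - 1 - i by omega] using this
        · set k := s.length - 1 - i with hk
          have hklt : k < s.length / 2 := by omega
          have := hall k hklt
          rw [PySem.List.pyGet?_natCast] at this
          rw [show (-1 - (k:Int)) = -((k+1 : Nat) : Int) by push_cast; ring] at this
          rw [PySem.List.pyGet?_neg_natCast s (k+1) (by omega) (by omega)] at this
          have hi' : s.length - (k+1) = i := by omega
          rw [hi'] at this
          simpa using this.symm
      · rw [List.getElem?_eq_none (by omega : s.length ≤ i),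
           List.getElem?_eq_none (show s.reverse.length ≤ i by simpa using by omega)]
    · rintro ⟨-, hrev⟩ i hlt
      rw [PySem.List.pyGet?_natCast,
          show (-1 - (i:Int)) = -((i+1 : Nat) : Int) by push_cast; ring,
          PySem.List.pyGet?_neg_natCast s (i+1) (by omega) (by omega)]
      have : s[i]? = s.reverse[i]? := by rw [← hrev]
      rw [List.getElem?_reverse (by omega)] at this
      simpa [show s.length - (i+1) = s.length - 1 - i by omega] using this

theorem checkA_odd (s : List Int) (h : s.length % 2 = 1) : checkA s = false := by
  simp [checkA, h]

theorem checkA_eq_beq_of_even (s : List Int) (h : s.length % 2 = 0) :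
    checkA s = (s == s.reverse) := by
  by_cases hp : s = s.reverse
  · rw [(checkA_true_iff s).2 ⟨h, hp⟩]; exact (beq_iff_eq.2 hp).symm
  · have hc : checkA s = false := by
      cases hc : checkA s
      · rfl
      · exact absurd ((checkA_true_iff s).1 hc).2 hp
    rw [hc]; simp [hp]

theorem runA_step (t : List Int) : ∀ (s : List Int) (c : Int), s ≠ [] →
    runA s c t = match extSearch s t with
      | some i => runA [] (c + 1) (t.drop i)
      | none => -1 := by
  induction t with
  | nil =>
      intro s c hs
      rw [show extSearch s [] = none from rfl]
      simp [runA, hs]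
  | cons x t' ih =>
      intro s c hs
      by_cases hc : checkA (s ++ [x])
      · simp [runA, extSearch, stepA, hc]
      · have := ih (s ++ [x]) c (by simp)
        simp only [runA, List.foldl_cons, stepA, if_neg hc] at this ⊢
        rw [this]
        simp only [extSearch, if_neg hc]
        cases extSearch (s ++ [x]) t' with
        | none => rfl
        | some i => rfl

theorem take_two_append (s : List Int) (x y : Int) (u' : List Int) :
    (s ++ x :: y :: u').take (s.length + 2) = s ++ [x, y] := by
  rw [List.take_append]
  simp

theorem searchB_eq_extSearch (N : Nat) : ∀ (u s : List Int), u.length ≤ N → s.length % 2 = 0 →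
    searchB (s ++ u) ((s.length : Int) + 2) =
      (extSearch s u).map (fun i => ((s.length + i : Nat) : Int)) := by
  induction N with
  | zero =>
      intro u s hlen _
      have : u = [] := List.length_eq_zero_iff.1 (Nat.le_zero.1 hlen)
      subst this
      rw [searchB, show extSearch s [] = none from rfl]
      simp
  | succ N ih =>
      intro u s hlen hs
      match u with
      | [] =>
          rw [searchB, show extSearch s [] = none from rfl]
          simp
      | [x] =>
          rw [searchB]
          have h1 : checkA (s ++ [x]) = false := checkA_odd _ (by simp; omega)
          rw [show extSearch s [x] = if checkA (s ++ [x]) then some 1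
                else (extSearch (s ++ [x]) []).map (· + 1) from rfl, h1,
              show extSearch (s ++ [x]) [] = none from rfl]
          simp
      | x :: y :: u' =>
          rw [searchB]
          have hle : ((s.length : Int) + 2) ≤ ((s ++ x :: y :: u').length : Int) := by
            simp; omega
          rw [dif_pos hle]
          have hseg : PySem.List.slice (s ++ x :: y :: u') none (some ((s.length : Int) + 2))
              = s ++ [x, y] := by
            rw [PySem.List.slice_to _ (by omega)]
            rw [show ((s.length : Int) + 2).toNat = s.length + 2 by omega]
            exact take_two_append s x y u'
          have hx : checkA (s ++ [x]) = false := checkA_odd _ (by simp; omega)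
          have hxy : checkA (s ++ [x, y]) = ((s ++ [x, y]) == (s ++ [x, y]).reverse) :=
            checkA_eq_beq_of_even _ (by simp; omega)
          have hext : extSearch s (x :: y :: u') =
              if checkA (s ++ [x, y]) then some 2
              else (extSearch (s ++ [x, y]) u').map (· + 2) := by
            rw [show extSearch s (x :: y :: u') = if checkA (s ++ [x]) then some 1
                  else (extSearch (s ++ [x]) (y :: u')).map (· + 1) from rfl, hx]
            rw [show extSearch (s ++ [x]) (y :: u') = if checkA ((s ++ [x]) ++ [y]) then some 1
                  else (extSearch ((s ++ [x]) ++ [y]) (y :: u').tail).map (· + 1) from rfl]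
            rw [List.append_assoc]
            simp only [List.singleton_append, List.tail_cons]
            by_cases hc : checkA (s ++ [x, y])
            · simp [hc]
            · simp [hc, Option.map_map]
          rw [hseg, hext]
          by_cases hc : checkA (s ++ [x, y])
          · rw [if_pos (by rw [← hxy]; exact hc), if_pos hc]
            simp
          · rw [if_neg (by rw [← hxy]; simpa using hc), if_neg hc]
            have heq : s ++ x :: y :: u' = (s ++ [x, y]) ++ u' := by simp
            have harith : (s.length : Int) + 2 + 2 = (((s ++ [x, y]).length : Nat) : Int) + 2 := by
              simp
            rw [heq, harith, ih u' (s ++ [x, y]) (by simp at hlen ⊢; omega) (by simp; omega)]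
            cases extSearch (s ++ [x, y]) u' with
            | none => rfl
            | some i => simp; ring

theorem runA_eq_goB (t : List Int) (c : Int) : runA [] c t = goB t c := by
  have H : ∀ (N : Nat) (t : List Int) (c : Int), t.length ≤ N → runA [] c t = goB t c := by
    intro N
    induction N with
    | zero =>
        intro t c hlen
        have : t = [] := List.length_eq_zero_iff.1 (Nat.le_zero.1 hlen)
        subst this
        rw [goB]; simp [runA]
    | succ N ih =>
        intro t c hlen
        match t with
        | [] => rw [goB]; simp [runA]
        | x :: t' =>
            have hx : checkA [x] = false := checkA_odd [x] (by simp)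
            have hL : runA [] c (x :: t') = runA [x] c t' := by
              simp [runA, stepA, hx]
            have hsearch : searchB (x :: t') 2 =
                (extSearch [x] t').map (fun i => ((i + 1 : Nat) : Int)) := by
              have h0 := searchB_eq_extSearch (N + 1) (x :: t') [] (by simpa using hlen) (by simp)
              simp only [List.nil_append, List.length_nil, Nat.cast_zero, zero_add] at h0
              rw [h0]
              rw [show extSearch [] (x :: t') = if checkA ([] ++ [x]) then some 1
                    else (extSearch ([] ++ [x]) t').map (· + 1) from rfl]
              simp only [List.nil_append]
              rw [hx]
              simp [Option.map_map]
              rfl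
            rw [hL, runA_step t' [x] c (by simp)]
            rw [goB]
            simp only [List.isEmpty_cons, Bool.false_eq_true, if_false]
            cases hext : extSearch [x] t' with
            | none =>
                rw [hext] at hsearch
                simp only [Option.map_none] at hsearch
                rw [hsearch]
            | some i =>
                rw [hext] at hsearch
                simp only [Option.map_some] at hsearch
                rw [hsearch]
                have hdrop : PySem.List.slice (x :: t') (some ((i + 1 : Nat) : Int)) none
                    = t'.drop i := by
                  rw [PySem.List.slice_from_natCast]
                  rfl
                show runA [] (c + 1) (t'.drop i)
                    = goB (PySem.List.slice (x :: t') (some ((i + 1 : Nat) : Int)) none) (c + 1)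
                rw [hdrop]
                exact ih (t'.drop i) (c + 1) (by simp at hlen ⊢; omega)
  exact H t.length t c le_rfl

-- ===== VERDICT (by name: the statement is the Claim_ definition above) =====
theorem solution_spec : Claim_equal_solution := by
  intro n arr _
  unfold Spec_solution solution solution_alt
  exact runA_eq_goB arr 0
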